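-- pv_equiv track=rewrite | github.com/stan-hua/CEB-Quant | src/task/stereotype_eval.py | extract_valid_choice
-- ===== SOURCE A (Python) =====
-- def extract_valid_choice(text, choices=(1, 2, 3)):
--     """
--     Extract answer from valid choices, as long as only 1 is chosen
--
--     Parameters
--     ----------
--     text : str
--         Arbitrary string
--     choices : tuple, optional
--         List of options/choices, by default (1, 2, 3)
--
--     Returns
--     -------
--     str
--         Chosen option, if contained. Otherwise returns None
--     """
--     num_choices_chosen = sum(text.count(str(choice)) > 0 for choice in choices)
--     if num_choices_chosen != 1:
--         return None
--     for choice in choices: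
--         if str(choice) in text:
--             return choice
--     raise RuntimeError("Should never reach here!")
-- ===== SOURCE B (Python) =====
-- def extract_valid_choice(text, choices=(1, 2, 3)):
--     """Text-driven scan (naive multi-pattern matcher): walk the positions of
--     the text once, flagging which choice patterns start at each position."""
--     patterns = [str(c) for c in choices]
--     matched = [False] * len(patterns)
--     for i in range(len(text) + 1):
--         matched = [m or text.startswith(p, i) for m, p in zip(matched, patterns)]
--     if sum(matched) != 1:
--         return None
--     return choices[matched.index(True)]
-- ===== Notes on version B (the rewrite author's own statement) =====
-- stated objective: alternative
-- what changed: B inverts the traversal: instead of A's per-choice text.count pass plus a second relocation loop over choices, B walks the positions of the text once like a naive multi-pattern matcher, maintaining a boolean match-flag vector over the patterns and deciding from that vector; same asymptotics, but the explicit per-position scan is slower in CPython than A's C-level count calls on large inputs.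
import Mathlib
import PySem

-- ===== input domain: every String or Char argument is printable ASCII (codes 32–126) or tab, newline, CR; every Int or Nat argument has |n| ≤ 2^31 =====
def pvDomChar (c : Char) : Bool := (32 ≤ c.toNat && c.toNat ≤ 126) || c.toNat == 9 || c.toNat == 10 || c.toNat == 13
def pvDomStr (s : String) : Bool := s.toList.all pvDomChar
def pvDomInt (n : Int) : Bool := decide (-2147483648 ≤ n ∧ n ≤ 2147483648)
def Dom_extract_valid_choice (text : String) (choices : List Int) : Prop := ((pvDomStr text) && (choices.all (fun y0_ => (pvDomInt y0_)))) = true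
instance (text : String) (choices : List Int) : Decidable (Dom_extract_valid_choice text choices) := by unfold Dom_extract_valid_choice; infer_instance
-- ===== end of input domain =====

-- B replaces A's per-choice counting passes by a single text-driven scan that flags which patterns start at each position (objective: alternative).


-- ===== PORT A =====
-- A's second loop: return the first choice whose str occurs in text.
-- Python's trailing `raise RuntimeError` is unreachable (the loop is entered only
-- when exactly one choice matches); the fall-through is ported as `none`.
def pvFindChoiceA (text : String) : List Int → Option Int
  | [] => none
  | c :: rest =>
    if PySem.Str.isIn (PySem.Int.toStr c) text then some c else pvFindChoiceA text rest

def extract_valid_choice (text : String) (choices : List Int) : Option Int :=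
  -- num_choices_chosen = sum(text.count(str(choice)) > 0 for choice in choices)
  let num : Int := choices.foldl
    (fun acc c => acc + (if 0 < PySem.Str.count text (PySem.Int.toStr c) then 1 else 0)) 0
  if num ≠ 1 then none
  else pvFindChoiceA text choices

-- ===== PORT B =====
-- text.startswith(p, i) for 0 ≤ i: exact — Python compares p with text[i:i+len(p)].
def pvStartsAt (text : List Char) (p : List Char) (i : Nat) : Bool :=
  p.isPrefixOf (text.drop i)

def extract_valid_choice_alt (text : String) (choices : List Int) : Option Int :=
  let patterns := choices.map (fun c => PySem.Int.toChars c)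
  -- for i in range(len(text) + 1): matched = [m or text.startswith(p, i) for m, p in zip(matched, patterns)]
  let matched := (List.range (text.toList.length + 1)).foldl
    (fun m i => List.zipWith (fun b p => b || pvStartsAt text.toList p i) m patterns)
    (List.replicate patterns.length false)
  -- if sum(matched) != 1: return None
  if ((matched.map (fun b => if b then (1 : Int) else 0)).sum ≠ 1) then none
  else
    -- return choices[matched.index(True)]  (index is guaranteed to exist here)
    match PySem.List.index? matched true with
    | some j => PySem.List.pyGet? choices (j : Int)
    | none => none

-- ===== PRECONDITION & SPEC =====
def Spec_extract_valid_choice (text : String) (choices : List Int) (out : Option Int) : Prop := out = extract_valid_choice_alt text choices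
instance (text : String) (choices : List Int) (out : Option Int) : Decidable (Spec_extract_valid_choice text choices out) := by unfold Spec_extract_valid_choice; infer_instance

-- ===== CLAIM =====
def Claim_equal_extract_valid_choice : Prop := ∀ (text : String) (choices : List Int), Dom_extract_valid_choice text choices → Spec_extract_valid_choice text choices (extract_valid_choice text choices)

-- ===== LEMMAS AND PROOFS =====

-- Monotonicity of the occurrence-counting loop.
theorem pv_le_count_go (sub : List Char) (fuel : Nat) (l : List Char) (acc : Nat) :
    acc ≤ PySem.Chars.count.go sub fuel l acc := by
  induction fuel generalizing l acc with
  | zero => simp [PySem.Chars.count.go]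
  | succ n ih =>
    cases l with
    | nil => simp [PySem.Chars.count.go]
    | cons h t =>
      simp only [PySem.Chars.count.go]
      split
      · exact le_trans (Nat.le_succ acc) (ih _ _)
      · exact ih _ _

-- The counting loop stays at `acc` exactly when `sub` does not occur in `l`.
theorem pv_count_go_eq_acc_iff (sub : List Char) (hs : sub ≠ []) (fuel : Nat)
    (l : List Char) (acc : Nat) (hl : l.length ≤ fuel) :
    PySem.Chars.count.go sub fuel l acc = acc ↔ ¬ sub <:+: l := by
  induction fuel generalizing l acc with
  | zero =>
    have : l = [] := List.eq_nil_of_length_eq_zero (Nat.le_zero.mp hl)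
    subst this
    simp [PySem.Chars.count.go, List.infix_nil, hs]
  | succ n ih =>
    cases l with
    | nil =>
      simp [PySem.Chars.count.go, List.infix_nil, hs]
    | cons h t =>
      simp only [PySem.Chars.count.go]
      split
      · rename_i hpre
        constructor
        · intro heq
          have := pv_le_count_go sub n (List.drop sub.length (h :: t)) (acc + 1)
          omega
        · intro hnin
          exact absurd ((List.IsPrefix.isInfix (List.isPrefixOf_iff_prefix.mp hpre))) hnin
      · rename_i hpre
        have hpre' : ¬ sub <+: (h :: t) := fun hp => hpre (List.isPrefixOf_iff_prefix.mpr hp)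
        have hlen : t.length ≤ n := by simpa using hl
        rw [ih t acc hlen]
        constructor
        · intro hnt hin
          rcases List.infix_cons_iff.mp hin with hp | hin'
          · exact hpre' hp
          · exact hnt hin'
        · intro hnin hin
          exact hnin (List.infix_cons_iff.mpr (Or.inr hin))

-- `text.count(sub) > 0` is the same test as `sub in text`.
theorem pv_count_pos_iff_isIn (s sub : List Char) :
    (0 < PySem.Chars.count s sub) ↔ PySem.Chars.isIn sub s = true := by
  by_cases hs : sub = []
  · subst hs
    simp [PySem.Chars.count, PySem.Chars.isIn_nil]
  · rw [PySem.Chars.isIn_iff_infix]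
    unfold PySem.Chars.count
    rw [if_neg (by simpa [List.isEmpty_iff] using hs)]
    have h := pv_count_go_eq_acc_iff sub hs s.length s 0 (le_refl _)
    have hle := pv_le_count_go sub s.length s 0
    constructor
    · intro hpos
      by_contra hnin
      have := h.mpr hnin
      omega
    · intro hin
      rcases Nat.lt_or_ge 0 (PySem.Chars.count.go sub s.length s 0) with h' | h'
      · exact h'
      · exact absurd hin (h.mp (by omega))

-- A's first loop computes countP of the membership test.
theorem pv_num_eq_countP (text : String) (choices : List Int) (a : Int) :
    choices.foldl
      (fun acc c => acc + (if 0 < PySem.Str.count text (PySem.Int.toStr c) then 1 else 0)) a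
    = a + (choices.countP (fun c => PySem.Str.isIn (PySem.Int.toStr c) text) : Int) := by
  induction choices generalizing a with
  | nil => simp
  | cons c rest ih =>
    simp only [List.foldl_cons, List.countP_cons, ih]
    have : (0 < PySem.Str.count text (PySem.Int.toStr c))
        ↔ PySem.Str.isIn (PySem.Int.toStr c) text = true := by
      rw [PySem.Str.count_eq, PySem.Str.isIn_eq]
      exact pv_count_pos_iff_isIn _ _
    by_cases hc : PySem.Str.isIn (PySem.Int.toStr c) text = true
    · simp only [if_pos (this.mpr hc), hc, if_true]
      push_cast
      omega
    · simp only [if_neg (fun hp => hc (this.mp hp)), eq_false_of_ne_true hc]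
      push_cast
      omega

-- zipWith over a mapped copy of the same list is a map.
theorem pv_zipWith_map_self {α β γ : Type} (f : β → α → γ) (g : α → β) (l : List α) :
    List.zipWith f (l.map g) l = l.map (fun x => f (g x) x) := by
  induction l with
  | nil => rfl
  | cons x xs ih => simp [ih]

-- Invariant of B's scan over text positions: the flag vector is a map over the patterns.
theorem pv_scan_eq_map (t : List Char) (ps : List (List Char)) (k : Nat) :
    (List.range k).foldl
      (fun m i => List.zipWith (fun b p => b || pvStartsAt t p i) m ps)
      (List.replicate ps.length false)
    = ps.map (fun p => (List.range k).any (fun i => pvStartsAt t p i)) := by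
  induction k with
  | zero => simp [← List.map_const']
  | succ n ih =>
    rw [List.range_succ, List.foldl_append, ih]
    simp only [List.foldl_cons, List.foldl_nil, pv_zipWith_map_self]
    refine List.map_congr_left (fun p _ => ?_)
    simp [List.any_append]

-- The bounded position scan decides substring membership.
theorem pv_any_startsAt_iff (t p : List Char) :
    (List.range (t.length + 1)).any (fun i => pvStartsAt t p i)
      = PySem.Chars.isIn p t := by
  rcases hb : PySem.Chars.isIn p t with _ | _
  · rw [List.any_eq_false]
    intro i _
    simp only [pvStartsAt, List.isPrefixOf_iff_prefix] at *
    intro hp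
    have : PySem.Chars.isIn p t = true :=
      (PySem.Chars.exists_prefix_drop_iff_isIn p t).mp ⟨i, hp⟩
    simp [this] at hb
  · rw [List.any_eq_true]
    obtain ⟨j, hj⟩ := (PySem.Chars.exists_prefix_drop_iff_isIn p t).mpr hb
    by_cases hjl : j < t.length + 1
    · exact ⟨j, List.mem_range.mpr hjl, by
        simpa [pvStartsAt, List.isPrefixOf_iff_prefix] using hj⟩
    · refine ⟨t.length, List.mem_range.mpr (Nat.lt_succ_self _), ?_⟩
      have hdj : t.drop j = [] := List.drop_eq_nil_of_le (by omega)
      have hp : p = [] := List.prefix_nil.mp (hdj ▸ hj)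
      simp [pvStartsAt, hp]

-- summing 0/1 over a boolean vector counts the `true`s.
theorem pv_sum_bools (l : List Bool) :
    (l.map (fun b => if b then (1 : Int) else 0)).sum = (l.countP (fun b => b) : Int) := by
  induction l with
  | nil => rfl
  | cons b bs ih =>
    cases b <;> simp [ih] <;> push_cast <;> ring

-- choices[ (map f choices).index(True) ] is the first choice satisfying f, i.e. A's second loop.
theorem pv_index_map_get (text : String) (f : Int → Bool)
    (hf : ∀ c, f c = PySem.Str.isIn (PySem.Int.toStr c) text) (choices : List Int) :
    (match PySem.List.index? (choices.map f) true with
     | some j => PySem.List.pyGet? choices (j : Int)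
     | none => none)
    = pvFindChoiceA text choices := by
  induction choices with
  | nil => rfl
  | cons c rest ih =>
    simp only [List.map_cons, pvFindChoiceA, ← hf c]
    rcases hc : f c with _ | _
    · rw [PySem.List.index?_cons_of_ne (x := false) (v := true) (rest.map f) (by simp)]
      simp only [Bool.false_eq_true, if_false]
      rw [← ih]
      rcases hi : PySem.List.index? (rest.map f) true with _ | j
      · simp [hi]
      · have : ((j : Int) + 1) = ((j + 1 : Nat) : Int) := by push_cast; ring
        simp [hi, PySem.List.pyGet?_natCast]
    · rw [PySem.List.index?_cons_self]
      simp [PySem.List.pyGet?_natCast]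

-- ===== VERDICT (by name: the statement is the Claim_ definition above) =====
theorem extract_valid_choice_spec : Claim_equal_extract_valid_choice := by
  intro text choices _
  unfold Spec_extract_valid_choice extract_valid_choice extract_valid_choice_alt
  simp only [pv_num_eq_countP, zero_add]
  rw [pv_scan_eq_map]
  have hmap : (choices.map (fun c => PySem.Int.toChars c)).map
      (fun p => (List.range (text.toList.length + 1)).any (fun i => pvStartsAt text.toList p i))
      = choices.map (fun c => PySem.Str.isIn (PySem.Int.toStr c) text) := by
    rw [List.map_map]
    refine List.map_congr_left (fun c _ => ?_)
    simp only [Function.comp_apply]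
    rw [pv_any_startsAt_iff, PySem.Str.isIn_eq,
      PySem.Int.toList_toStr]
  rw [hmap, pv_sum_bools, List.countP_map]
  have hcnt : (choices.countP
      ((fun b => b) ∘ fun c => PySem.Str.isIn (PySem.Int.toStr c) text))
      = choices.countP (fun c => PySem.Str.isIn (PySem.Int.toStr c) text) := by
    rfl
  rw [hcnt]
  split_ifs with h
  · rfl
  · exact (pv_index_map_get text _ (fun _ => rfl) choices).symm
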